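-- pv_equiv track=rewrite | github.com/20-with-Java/Part4_FastCampus | ch6/clip3/boj15823/main.py | can_make_packs
-- ===== SOURCE A (Python) =====
-- def can_make_packs(cards, max_pack_size, m):
--     pack_count = 0
--     start = 0
--     last_occurrence = {}
--
--     for end, card in enumerate(cards):
--         if card in last_occurrence and last_occurrence[card] >= start:
--             start = last_occurrence[card] + 1
--
--         if end - start + 1 == max_pack_size:
--             pack_count += 1
--             start = end + 1
--
--         last_occurrence[card] = end
--
--     return pack_count >= m
-- ===== SOURCE B (Python) =====
-- def can_make_packs(cards, max_pack_size, m):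
--     pack_count = 0
--     start = 0
--     seen = set()
--
--     for end, card in enumerate(cards):
--         while card in seen:
--             seen.discard(cards[start])
--             start += 1
--         seen.add(card)
--
--         if end - start + 1 == max_pack_size:
--             pack_count += 1
--             seen.clear()
--             start = end + 1
--
--     return pack_count >= m
-- ===== Notes on version B (the rewrite author's own statement) =====
-- stated objective: idiomatic
-- what changed: Replaces A's dict of last-occurrence indices and O(1) start jump by the textbook sliding-window set of the current window's cards, shrunk incrementally from the left with a while-loop until the duplicate leaves, and cleared when a pack is formed.
import Mathlib
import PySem

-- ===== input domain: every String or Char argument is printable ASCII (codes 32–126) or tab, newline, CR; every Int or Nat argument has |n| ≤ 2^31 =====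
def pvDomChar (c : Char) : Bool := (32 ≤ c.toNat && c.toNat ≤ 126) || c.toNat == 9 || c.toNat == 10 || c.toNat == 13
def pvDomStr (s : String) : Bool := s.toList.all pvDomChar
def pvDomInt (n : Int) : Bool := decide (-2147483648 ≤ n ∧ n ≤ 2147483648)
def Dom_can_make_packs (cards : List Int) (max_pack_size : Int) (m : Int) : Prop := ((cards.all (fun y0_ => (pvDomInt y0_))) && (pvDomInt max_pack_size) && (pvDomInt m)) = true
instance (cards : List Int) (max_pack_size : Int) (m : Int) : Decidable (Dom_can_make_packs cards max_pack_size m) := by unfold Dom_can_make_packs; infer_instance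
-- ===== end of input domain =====

-- B replaces A's dict of last-occurrence indices (O(1) start jump) by a set of the current
-- window's cards shrunk incrementally from the left (idiomatic sliding-window); same results.

-- ===== PORT A =====
-- A's for-loop over enumerate(cards) as structural recursion; state (e, pack_count, start, last_occurrence).
def canPacksLoopA (max_pack_size : Int) : List Int → Int → Int → Int → PySem.Dict Int Int → Int
  | [], _, pack_count, _, _ => pack_count
  | card :: rest, e, pack_count, start, last =>
    -- if card in last_occurrence and last_occurrence[card] >= start: start = last_occurrence[card] + 1
    let start1 :=
      match last.get? card with
      | some j => if j ≥ start then j + 1 else start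
      | none => start
    if e - start1 + 1 = max_pack_size then
      canPacksLoopA max_pack_size rest (e + 1) (pack_count + 1) (e + 1) (last.insert card e)
    else
      canPacksLoopA max_pack_size rest (e + 1) pack_count start1 (last.insert card e)

def can_make_packs (cards : List Int) (max_pack_size : Int) (m : Int) : Bool :=
  decide (canPacksLoopA max_pack_size cards 0 0 0 PySem.Dict.empty ≥ m)

-- ===== PORT B =====
-- B's inner 'while card in seen: seen.discard(cards[start]); start += 1', with fuel only to make it
-- total (fuel = len(cards) is always enough: the loop stops once the window is exhausted).
def shrinkB (cards : List Int) (card : Int) : Nat → Int → PySem.Set Int → Int × PySem.Set Int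
  | 0, start, seen => (start, seen)
  | fuel + 1, start, seen =>
    if PySem.Set.contains seen card then
      shrinkB cards card fuel (start + 1) (PySem.Set.discard seen (PySem.List.pyGetD cards start 0))
    else (start, seen)

-- B's for-loop; state (e, pack_count, start, seen).
def canPacksLoopB (cards : List Int) (max_pack_size : Int) : List Int → Int → Int → Int → PySem.Set Int → Int
  | [], _, pack_count, _, _ => pack_count
  | card :: rest, e, pack_count, start, seen =>
    let p := shrinkB cards card cards.length start seen
    let seen2 := PySem.Set.add p.2 card
    if e - p.1 + 1 = max_pack_size then
      canPacksLoopB cards max_pack_size rest (e + 1) (pack_count + 1) (e + 1) PySem.Set.empty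
    else
      canPacksLoopB cards max_pack_size rest (e + 1) pack_count p.1 seen2

def can_make_packs_alt (cards : List Int) (max_pack_size : Int) (m : Int) : Bool :=
  decide (canPacksLoopB cards max_pack_size cards 0 0 0 PySem.Set.empty ≥ m)

-- ===== PRECONDITION & SPEC =====
def Spec_can_make_packs (cards : List Int) (max_pack_size : Int) (m : Int) (out : Bool) : Prop := out = can_make_packs_alt cards max_pack_size m
instance (cards : List Int) (max_pack_size : Int) (m : Int) (out : Bool) : Decidable (Spec_can_make_packs cards max_pack_size m out) := by unfold Spec_can_make_packs; infer_instance

-- ===== CLAIM (what is proved, stated in full; the proofs are below) =====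
def Claim_equal_can_make_packs : Prop := ∀ (cards : List Int) (max_pack_size : Int) (m : Int), Dom_can_make_packs cards max_pack_size m → Spec_can_make_packs cards max_pack_size m (can_make_packs cards max_pack_size m)

-- ===== LEMMAS AND PROOFS =====

-- Invariant for A's dict after processing the prefix `pre`: it maps each card to its last index in `pre`.
def LastInv (pre : List Int) (last : PySem.Dict Int Int) : Prop :=
  ∀ c : Int,
    (∀ j : Int, last.get? c = some j →
        0 ≤ j ∧ j.toNat < pre.length ∧ pre.getD j.toNat 0 = c ∧ c ∉ pre.drop (j.toNat + 1)) ∧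
    (last.get? c = none → c ∉ pre)

theorem discard_cons_self (a : Int) (t : List Int) (h : (a :: t).Nodup) :
    PySem.Set.discard (a :: t) a = t := by
  simp only [PySem.Set.discard, List.filter, beq_self_eq_true, Bool.not_true]
  rw [List.filter_eq_self.mpr]
  intro b hb
  simp only [Bool.not_eq_eq_eq_not, Bool.not_true, beq_eq_false_iff_ne, ne_eq]
  exact fun e => (List.nodup_cons.mp h).1 (e ▸ hb)

theorem shrink_stop (cards : List Int) (card : Int) (fuel : Nat) (s : Int) (seen : PySem.Set Int)
    (h : card ∉ seen) : shrinkB cards card (fuel + 1) s seen = (s, seen) := by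
  simp [shrinkB, PySem.Set.contains, h]

theorem mem_drop_of_le {c : Int} {pre : List Int} {a b : Nat} (h : b ≤ a)
    (hm : c ∈ pre.drop a) : c ∈ pre.drop b := by
  have he : pre.drop a = (pre.drop b).drop (a - b) := by rw [List.drop_drop]; congr 1; omega
  exact List.mem_of_mem_drop (he ▸ hm)

theorem mem_drop_of_getD {pre : List Int} {j : Nat} {card : Int} (hj : j < pre.length)
    (hcard : pre.getD j 0 = card) : card ∈ pre.drop j := by
  rw [List.drop_eq_getElem_cons hj]
  rw [List.getD_eq_getElem pre 0 hj] at hcard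
  exact hcard ▸ List.mem_cons_self

theorem shrink_run (cards pre : List Int) (card : Int) (j : Nat)
    (hpre : pre <+: cards) (hj : j < pre.length)
    (hcard : pre.getD j 0 = card) (hnot : card ∉ pre.drop (j + 1)) :
    ∀ (fuel s : Nat), s ≤ j + 1 → j + 1 - s ≤ fuel → (pre.drop s).Nodup →
    shrinkB cards card fuel (s : Int) (pre.drop s) = (((j + 1 : Nat) : Int), pre.drop (j + 1)) := by
  intro fuel
  induction fuel with
  | zero =>
    intro s hs hf _
    have : s = j + 1 := by omega
    subst this
    simp [shrinkB]
  | succ fuel ih =>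
    intro s hs hf hnd
    by_cases hsj : s = j + 1
    · subst hsj
      rw [shrink_stop _ _ _ _ _ hnot]
    · have hslt : s ≤ j := by omega
      have hmem : card ∈ pre.drop s := mem_drop_of_le hslt (mem_drop_of_getD hj hcard)
      have hcont : PySem.Set.contains (pre.drop s) card = true := by
        simpa [PySem.Set.contains] using hmem
      have hslen : s < pre.length := by omega
      have hget : PySem.List.pyGetD cards (s : Int) 0 = pre.getD s 0 := by
        obtain ⟨t, rfl⟩ := hpre
        rw [PySem.List.pyGetD_natCast]
        rw [List.getD_append _ _ _ _ (by omega)]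
      have hhead : pre.drop s = pre.getD s 0 :: pre.drop (s + 1) := by
        rw [List.getD_eq_getElem pre 0 hslen]
        exact List.drop_eq_getElem_cons hslen
      have hnd' : (pre.drop (s + 1)).Nodup := by
        have he : pre.drop (s + 1) = (pre.drop s).drop 1 := by rw [List.drop_drop]
        rw [he]
        exact hnd.sublist (List.drop_sublist _ _)
      have hdisc : PySem.Set.discard (pre.drop s) (pre.getD s 0) = pre.drop (s + 1) := by
        rw [hhead]
        exact discard_cons_self _ _ (hhead ▸ hnd)
      simp only [shrinkB, hcont, if_true, hget, hdisc]
      have hcast : ((s : Int) + 1) = ((s + 1 : Nat) : Int) := by push_cast; ring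
      rw [hcast]
      exact ih (s + 1) (by omega) (by omega) hnd'

theorem nodup_append_singleton (t : List Int) (c : Int) (h : t.Nodup) (hc : c ∉ t) : (t ++ [c]).Nodup := by
  simp [List.nodup_append, h]
  exact fun a ha e => hc (e ▸ ha)

theorem LastInv_insert (pre : List Int) (card : Int) (last : PySem.Dict Int Int)
    (h : LastInv pre last) : LastInv (pre ++ [card]) (last.insert card (pre.length : Int)) := by
  intro c
  by_cases hc : c = card
  · subst hc
    constructor
    · intro j hj
      rw [PySem.Dict.get?_insert_self] at hj
      have : j = (pre.length : Int) := by injection hj with h'; omega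
      subst this
      refine ⟨by positivity, by simp, ?_, ?_⟩
      · rw [show ((pre.length : Int)).toNat = pre.length from by omega]
        rw [List.getD_append_right pre [c] 0 pre.length (le_refl _)]
        simp
      · rw [List.drop_eq_nil_of_le (by simp)]
        simp
    · intro hn
      rw [PySem.Dict.get?_insert_self] at hn
      exact absurd hn (by simp)
  · rw [show (last.insert card (pre.length : Int)).get? c = last.get? c from
      PySem.Dict.get?_insert_of_ne _ _ hc]
    obtain ⟨h1, h2⟩ := h c
    constructor
    · intro j hj
      obtain ⟨hj0, hjl, hjg, hjn⟩ := h1 j hj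
      refine ⟨hj0, by simp; omega, ?_, ?_⟩
      · rw [List.getD_append _ _ _ _ (by omega)]
        exact hjg
      · rw [List.drop_append_of_le_length (by omega)]
        simp [hjn, hc]
    · intro hn
      have := h2 hn
      simp [this, hc]

theorem loop_eq (mps : Int) (rest : List Int) :
    ∀ (pre : List Int) (pack s : Int) (last : PySem.Dict Int Int),
    0 ≤ s → s.toNat ≤ pre.length → LastInv pre last → (pre.drop s.toNat).Nodup →
    canPacksLoopA mps rest (pre.length : Int) pack s last
      = canPacksLoopB (pre ++ rest) mps rest (pre.length : Int) pack s (pre.drop s.toNat) := by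
  induction rest with
  | nil => intro pre pack s last _ _ _ _; simp [canPacksLoopA, canPacksLoopB]
  | cons card rest ih =>
    intro pre pack s last hs0 hsl hlast hnd
    have hpre : pre <+: (pre ++ card :: rest) := ⟨card :: rest, rfl⟩
    have hflen : ∃ n, (pre ++ card :: rest).length = n + 1 := ⟨pre.length + rest.length, by simp; omega⟩
    obtain ⟨nf, hnf⟩ := hflen
    have happ : (pre ++ [card]) ++ rest = pre ++ card :: rest := by simp
    have hlen' : ((pre ++ [card]).length : Int) = (pre.length : Int) + 1 := by simp
    by_cases hmem : card ∈ pre.drop s.toNat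
    · -- the new card is already in the window
      rcases hg : last.get? card with _ | j
      · exact absurd (List.mem_of_mem_drop hmem) ((hlast card).2 hg)
      · obtain ⟨hj0, hjl, hjg, hjn⟩ := (hlast card).1 j hg
        have hjs : s ≤ j := by
          by_contra hlt
          push Not at hlt
          have hle : j.toNat + 1 ≤ s.toNat := by omega
          exact hjn (mem_drop_of_le hle hmem)
        have hshr : shrinkB (pre ++ card :: rest) card (pre ++ card :: rest).length s (pre.drop s.toNat)
            = (j + 1, pre.drop (j.toNat + 1)) := by
          have hs' : (s.toNat : Int) = s := Int.toNat_of_nonneg hs0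
          have hj' : ((j.toNat + 1 : Nat) : Int) = j + 1 := by omega
          rw [← hs', ← hj']
          exact shrink_run _ pre card j.toNat hpre hjl hjg hjn _ s.toNat (by omega)
            (by simp; omega) hnd
        have hadd : PySem.Set.add (pre.drop (j.toNat + 1)) card = pre.drop (j.toNat + 1) ++ [card] :=
          PySem.Set.add_of_not_mem hjn
        simp only [canPacksLoopA, canPacksLoopB, hg, hshr, hadd, if_pos hjs]
        by_cases hcond : (pre.length : Int) - (j + 1) + 1 = mps
        · rw [if_pos hcond, if_pos hcond]
          have h2 := ih (pre ++ [card]) (pack + 1) ((pre.length : Int) + 1)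
            (last.insert card (pre.length : Int)) (by positivity) (by simp)
            (LastInv_insert pre card last hlast) (by
              rw [List.drop_eq_nil_of_le (by simp)]; exact List.nodup_nil)
          rw [hlen', happ] at h2
          rw [show ((pre.length : Int) + 1).toNat = (pre ++ [card]).length from by simp,
            List.drop_length] at h2
          exact h2
        · rw [if_neg hcond, if_neg hcond]
          have hdropins : (pre ++ [card]).drop ((j + 1 : Int)).toNat
              = pre.drop (j.toNat + 1) ++ [card] := by
            rw [show ((j + 1 : Int)).toNat = j.toNat + 1 from by omega]
            rw [List.drop_append_of_le_length (by omega)]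
          have hnd2 : ((pre ++ [card]).drop ((j + 1 : Int)).toNat).Nodup := by
            rw [hdropins]
            have hsub : (pre.drop (j.toNat + 1)).Nodup := by
              have he : pre.drop (j.toNat + 1) = (pre.drop s.toNat).drop (j.toNat + 1 - s.toNat) := by
                rw [List.drop_drop]; congr 1; omega
              rw [he]
              exact hnd.sublist (List.drop_sublist _ _)
            exact nodup_append_singleton _ _ hsub hjn
          have h2 := ih (pre ++ [card]) pack (j + 1)
            (last.insert card (pre.length : Int)) (by omega) (by simp; omega)
            (LastInv_insert pre card last hlast) hnd2
          rw [hlen', happ, hdropins] at h2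
          exact h2
    · -- the new card is not in the window
      have hstart : (match last.get? card with
          | some j => if j ≥ s then j + 1 else s
          | none => s) = s := by
        rcases hg : last.get? card with _ | j
        · rfl
        · obtain ⟨hj0, hjl, hjg, hjn⟩ := (hlast card).1 j hg
          have : ¬ (j ≥ s) := by
            intro hge
            exact hmem (mem_drop_of_le (by omega) (mem_drop_of_getD hjl hjg))
          simp [this]
      have hshr : shrinkB (pre ++ card :: rest) card (pre ++ card :: rest).length s (pre.drop s.toNat)
          = (s, pre.drop s.toNat) := by
        rw [hnf]
        exact shrink_stop _ _ _ _ _ hmem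
      have hadd : PySem.Set.add (pre.drop s.toNat) card = pre.drop s.toNat ++ [card] :=
        PySem.Set.add_of_not_mem hmem
      simp only [canPacksLoopA, canPacksLoopB, hstart, hshr, hadd]
      by_cases hcond : (pre.length : Int) - s + 1 = mps
      · rw [if_pos hcond, if_pos hcond]
        have h2 := ih (pre ++ [card]) (pack + 1) ((pre.length : Int) + 1)
          (last.insert card (pre.length : Int)) (by positivity) (by simp)
          (LastInv_insert pre card last hlast) (by
            rw [List.drop_eq_nil_of_le (by simp)]; exact List.nodup_nil)
        rw [hlen', happ] at h2
        rw [show ((pre.length : Int) + 1).toNat = (pre ++ [card]).length from by simp,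
          List.drop_length] at h2
        exact h2
      · rw [if_neg hcond, if_neg hcond]
        have hdropins : (pre ++ [card]).drop s.toNat = pre.drop s.toNat ++ [card] := by
          rw [List.drop_append_of_le_length hsl]
        have hnd2 : ((pre ++ [card]).drop s.toNat).Nodup := by
          rw [hdropins]
          exact nodup_append_singleton _ _ hnd hmem
        have h2 := ih (pre ++ [card]) pack s
          (last.insert card (pre.length : Int)) hs0 (by simp; omega)
          (LastInv_insert pre card last hlast) hnd2
        rw [hlen', happ, hdropins] at h2
        exact h2

-- ===== VERDICT (by name: the statement is the Claim_ definition above) =====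
theorem can_make_packs_spec : Claim_equal_can_make_packs := by
  intro cards mps m _
  unfold Spec_can_make_packs can_make_packs can_make_packs_alt
  have h := loop_eq mps cards [] 0 0 PySem.Dict.empty (le_refl 0) (by simp) (by
    intro c
    constructor
    · intro j hj; simp [PySem.Dict.get?_empty] at hj
    · intro _; simp) (by simp)
  have h' : canPacksLoopA mps cards 0 0 0 PySem.Dict.empty
      = canPacksLoopB cards mps cards 0 0 0 PySem.Set.empty := by
    simpa [PySem.Set.empty] using h
  rw [h']
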